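-- pv_equiv track=rewrite | github.com/max7969/adventofcode2024 | day8/day8.py | read_content
-- ===== SOURCE A (Python) =====
-- def read_content(content):
--     dict = {}
--     for i, line in enumerate(content):
--         line = line.rstrip()
--         for j, element in enumerate(line):
--             if element != '.':
--                 if element not in dict:
--                     dict[element] = [(i,j)]
--                 else:
--                     dict[element].append((i,j))
--     return dict
-- ===== SOURCE B (Python) =====
-- def read_content(content):
--     records = [(el, (i, j))
--                for i, line in enumerate(content)
--                for j, el in enumerate(line.rstrip())
--                if el != '.']
--     keys = dict.fromkeys(el for el, _ in records)
--     return {c: [p for el, p in records if el == c] for c in keys}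
-- ===== Notes on version B (the rewrite author's own statement) =====
-- stated objective: alternative
-- what changed: Replaces the incremental scan-and-grow-dict loop (if-not-present branch per cell) with a collect-then-group pipeline: first flatten the grid to a list of (char, coordinate) records, then dedup the chars in first-occurrence order and build each group by filtering the record list.
import Mathlib
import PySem

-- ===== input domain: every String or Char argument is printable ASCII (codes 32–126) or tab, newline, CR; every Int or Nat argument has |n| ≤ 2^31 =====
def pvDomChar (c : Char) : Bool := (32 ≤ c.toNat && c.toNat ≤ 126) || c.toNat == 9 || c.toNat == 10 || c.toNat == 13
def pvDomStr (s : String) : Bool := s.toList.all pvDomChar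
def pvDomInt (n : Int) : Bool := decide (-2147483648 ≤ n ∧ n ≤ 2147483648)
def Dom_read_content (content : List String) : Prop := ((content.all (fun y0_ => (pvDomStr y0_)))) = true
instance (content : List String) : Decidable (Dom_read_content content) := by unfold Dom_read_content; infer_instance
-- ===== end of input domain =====

-- B replaces A's incremental grow-a-dict scan with a collect-records-then-group-by-dedup'd-key
-- pipeline (alternative decomposition, same results).


-- ===== PORT A =====
def read_content (content : List String) : List (String × List (Int × Int)) :=
  ((PySem.List.enumerate content).foldl (fun d p =>
    (PySem.List.enumerate (PySem.Str.rstrip p.2).toList).foldl (fun d q =>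
      if q.2 ≠ '.' then
        if ¬ d.contains (String.ofList [q.2]) then
          d.insert (String.ofList [q.2]) [(p.1, q.1)]
        else
          d.modify (String.ofList [q.2]) [] (· ++ [(p.1, q.1)])
      else d) d) (PySem.Dict.empty : PySem.Dict String (List (Int × Int)))).items

-- ===== PORT B =====
-- the flat record list [(el, (i, j)) ...] of Source B
def pvRecords (content : List String) : List (String × (Int × Int)) :=
  (PySem.List.enumerate content).flatMap (fun p =>
    (PySem.List.enumerate (PySem.Str.rstrip p.2).toList).filterMap (fun q =>
      if q.2 ≠ '.' then some (String.ofList [q.2], (p.1, q.1)) else none))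

def read_content_alt (content : List String) : List (String × List (Int × Int)) :=
  (PySem.List.dedup ((pvRecords content).map (fun r => r.1))).map (fun c =>
    (c, ((pvRecords content).filter (fun r => r.1 == c)).map (fun r => r.2)))

-- ===== PRECONDITION & SPEC =====
def Spec_read_content (content : List String) (out : List (String × List (Int × Int))) : Prop := out = read_content_alt content
instance (content : List String) (out : List (String × List (Int × Int))) : Decidable (Spec_read_content content out) := by unfold Spec_read_content; infer_instance

-- ===== CLAIM (what is proved, stated in full; the proofs are below) =====
def Claim_equal_read_content : Prop := ∀ (content : List String), Dom_read_content content → Spec_read_content content (read_content content)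

-- ===== LEMMAS AND PROOFS =====

-- A's per-cell step equals the grouping 'modify' step (insert on a fresh key = modify with default [])
lemma stepA_eq_modify (d : PySem.Dict String (List (Int × Int))) (k : String) (x : Int × Int) :
    (if ¬ d.contains k then d.insert k [x] else d.modify k [] (· ++ [x]))
      = d.modify k [] (· ++ [x]) := by
  by_cases h : d.contains k = true
  · simp [h]
  · simp only [Bool.not_eq_true] at h
    simp [h, PySem.Dict.modify, PySem.Dict.getD_of_not_contains d [] h]

-- A's inner loop over one line's cells = folding the grouping step over that line's records
lemma inner_loop_eq (l : List (Int × Char)) (i : Int)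
    (d : PySem.Dict String (List (Int × Int))) :
    l.foldl (fun d q =>
      if q.2 ≠ '.' then
        if ¬ d.contains (String.ofList [q.2]) then d.insert (String.ofList [q.2]) [(i, q.1)]
        else d.modify (String.ofList [q.2]) [] (· ++ [(i, q.1)])
      else d) d
    = (l.filterMap (fun q =>
        if q.2 ≠ '.' then some (String.ofList [q.2], (i, q.1)) else none)).foldl
        (fun d r => d.modify r.1 [] (· ++ [r.2])) d := by
  rw [List.foldl_filterMap]
  congr 1
  funext d q
  by_cases h : q.2 = '.'
  · simp [h]
  · simp only [h, ne_eq, not_false_eq_true, if_pos]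
    exact stepA_eq_modify d (String.ofList [q.2]) (i, q.1)

-- A's whole nested loop = folding the grouping step over the flat record list
lemma nested_loop_eq (ls : List (Int × String))
    (d : PySem.Dict String (List (Int × Int))) :
    ls.foldl (fun d p =>
      (PySem.List.enumerate (PySem.Str.rstrip p.2).toList).foldl (fun d q =>
        if q.2 ≠ '.' then
          if ¬ d.contains (String.ofList [q.2]) then d.insert (String.ofList [q.2]) [(p.1, q.1)]
          else d.modify (String.ofList [q.2]) [] (· ++ [(p.1, q.1)])
        else d) d) d
    = (ls.flatMap (fun p =>
        (PySem.List.enumerate (PySem.Str.rstrip p.2).toList).filterMap (fun q =>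
          if q.2 ≠ '.' then some (String.ofList [q.2], (p.1, q.1)) else none))).foldl
        (fun d r => d.modify r.1 [] (· ++ [r.2])) d := by
  induction ls generalizing d with
  | nil => rfl
  | cons p ls ih =>
    rw [List.foldl_cons, List.flatMap_cons, List.foldl_append, inner_loop_eq, ih]

-- ===== VERDICT (by name: the statement is the Claim_ definition above) =====
theorem read_content_spec : Claim_equal_read_content := by
  intro content _
  show read_content content = read_content_alt content
  have hA : read_content content
      = ((pvRecords content).foldl (fun d r => d.modify r.1 [] (· ++ [r.2]))
          (PySem.Dict.empty : PySem.Dict String (List (Int × Int)))).items := by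
    unfold read_content pvRecords
    rw [nested_loop_eq]
  rw [hA]
  have hnd : ((pvRecords content).foldl (fun d r => d.modify r.1 [] (· ++ [r.2]))
      (PySem.Dict.empty : PySem.Dict String (List (Int × Int)))).keys.Nodup :=
    PySem.Dict.nodup_keys_foldl_modify_key (pvRecords content) (fun r => r.1) []
      (fun _ r => (· ++ [r.2])) _ (by simp [PySem.Dict.keys_empty])
  rw [PySem.Dict.items_eq_map_keys _ hnd []]
  rw [PySem.Dict.keys_foldl_modify_key (pvRecords content) (fun r => r.1) []
      (fun _ r => (· ++ [r.2]))]
  unfold read_content_alt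
  rw [PySem.List.dedup_eq_ofList, PySem.Dict.keys_empty, PySem.Set.update_nil_left]
  apply List.map_congr_left
  intro c _
  rw [PySem.Dict.getD_foldl_modify_append]
  simp [PySem.Dict.getD_empty]
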